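-- pv_equiv track=rewrite | github.com/Olekkm/Practice_Malakhov_Oleg_8I22 | Pt_2_9.py | f
-- ===== SOURCE A (Python) =====
-- def f(n):
--     _max = -1
--     q = count = 0
--     n = str(n)
--     for i in n:
--         count += 1
--         if _max < int(i):
--             _max = int(i)
--             q = count
--     return q
-- ===== SOURCE B (Python) =====
-- def f(n):
--     digits = [int(c) for c in str(n)]
--     m = max(digits)
--     return digits.index(m) + 1
-- ===== Notes on version B (the rewrite author's own statement) =====
-- stated objective: idiomatic
-- what changed: Replaces A's single stateful loop tracking (_max, q, count) by a digit list built once, then two library scans: max() to find the largest digit and .index() for its first 1-based position.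
import Mathlib
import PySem

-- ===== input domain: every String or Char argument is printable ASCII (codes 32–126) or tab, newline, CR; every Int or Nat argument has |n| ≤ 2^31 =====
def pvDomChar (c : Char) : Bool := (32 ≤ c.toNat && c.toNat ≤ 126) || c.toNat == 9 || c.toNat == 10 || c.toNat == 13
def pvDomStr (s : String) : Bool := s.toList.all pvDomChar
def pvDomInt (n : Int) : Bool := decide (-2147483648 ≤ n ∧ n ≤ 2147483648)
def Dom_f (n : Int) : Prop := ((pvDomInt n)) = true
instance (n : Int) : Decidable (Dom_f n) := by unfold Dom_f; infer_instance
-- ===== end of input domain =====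

-- B replaces A's single stateful loop (tracking _max, q, count) by a digit list plus two library scans (max, then first index): idiomatic, same cost.

-- ===== PORT A =====
-- state is (_max, q, count); int(i) is ofChars? — its 'none' case (ValueError, excluded by Pre_f) is defaulted
def f (n : Int) : Int :=
  ((PySem.Int.toStr n).toList.foldl
    (fun (st : Int × Int × Int) i =>
      let count := st.2.2 + 1
      if st.1 < (PySem.Int.ofChars? [i]).getD 0 then
        ((PySem.Int.ofChars? [i]).getD 0, count, count)
      else (st.1, st.2.1, count))
    (-1, 0, 0)).2.1

-- ===== PORT B =====
-- digits = [int(c) for c in str(n)]; then max(digits) and digits.index(m) + 1.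
-- Python's max would raise on an empty list, but str(n) of an int is never empty, so the 'none'
-- branch is unreachable under Pre_f; .index never raises here since max(digits) ∈ digits.
def f_alt (n : Int) : Int :=
  let digits := (PySem.Int.toStr n).toList.map (fun c => (PySem.Int.ofChars? [c]).getD 0)
  match PySem.List.max? digits (fun x => x) with
  | some m => ((PySem.List.index? digits m).getD 0 : Int) + 1
  | none => 0

-- ===== PRECONDITION & SPEC =====
-- Pre_f excludes n < 0, where str(n) starts with '-' and int('-') raises ValueError in both A and B.
def Pre_f (n : Int) : Prop := 0 ≤ n
instance (n : Int) : Decidable (Pre_f n) := by unfold Pre_f; infer_instance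
def pvWitness_f : Int := 3921
def Spec_f (n : Int) (out : Int) : Prop := out = f_alt n
instance (n : Int) (out : Int) : Decidable (Spec_f n out) := by unfold Spec_f; infer_instance

-- ===== CLAIM (what is proved, stated in full; the proofs are below) =====
def Claim_equal_f : Prop := ∀ (n : Int), Dom_f n → Pre_f n → Spec_f n (f n)

-- ===== LEMMAS AND PROOFS =====

theorem foldl_max_pull (rs : List Int) : ∀ a b : Int, rs.foldl max (max a b) = max a (rs.foldl max b) := by
  induction rs with
  | nil => intro a b; rfl
  | cons r rs ih =>
    intro a b
    simp only [List.foldl_cons, max_assoc, ih]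

-- int(c) on a digit character: its numeric value (exact; single digit chars are the only ones str(n) produces for n ≥ 0)
theorem digit_ofChars (c : Char) (h : c.isDigit = true) :
    PySem.Int.ofChars? [c] = some ((c.toNat : Int) - 48) := by
  have h1 : 48 ≤ c.toNat ∧ c.toNat ≤ 57 := by
    simp only [Char.isDigit, Bool.and_eq_true, decide_eq_true_eq] at h
    exact h
  obtain ⟨n, hn⟩ : ∃ n, c.toNat = n := ⟨_, rfl⟩
  have ha : 48 ≤ n := hn ▸ h1.1
  have hb : n ≤ 57 := hn ▸ h1.2
  have hc : c = Char.ofNat n := by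
    apply Char.ext
    rw [Char.ofNat, dif_pos (Or.inl (by omega : n < 55296))]
    apply UInt32.toNat.inj
    simpa [Char.ofNatAux, UInt32.toNat_ofNat, Nat.mod_eq_of_lt (by omega : n < 4294967296)] using hn
  subst hc
  rw [hn]
  interval_cases n <;> decide

-- A's loop over the digit values, characterised by the running max and its first index
theorem loopA_eq (L : List Int) : ∀ mx q count : Int,
    (L.foldl (fun (st : Int × Int × Int) d =>
        let count := st.2.2 + 1
        if st.1 < d then (d, count, count) else (st.1, st.2.1, count)) (mx, q, count)).2.1 =
      match PySem.List.max? L (fun x => x) with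
      | none => q
      | some m => if mx < m then count + ((PySem.List.index? L m).getD 0 : Int) + 1 else q := by
  induction L with
  | nil => intro mx q count; rfl
  | cons d rest ih =>
    intro mx q count
    simp only [List.foldl_cons]
    rw [PySem.List.max?_id_cons]
    cases rest with
    | nil =>
      simp only [List.foldl_nil]
      by_cases hd : mx < d <;> simp [hd]
    | cons r rs =>
      have hmax : (r :: rs).foldl max d = max d ((r :: rs).foldl max r) := by
        simp only [List.foldl_cons]
        rw [show max d r = max d (max r r) by simp, foldl_max_pull]
      have hm' : PySem.List.max? (r :: rs) (fun x => x) = some ((r::rs).foldl max r) := by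
        rw [PySem.List.max?_id_cons]; simp
      set m' := (r :: rs).foldl max r with hm'def
      have hmem : m' ∈ r :: rs := PySem.List.max?_mem hm'
      obtain ⟨k, hk⟩ : ∃ k, PySem.List.index? (r :: rs) m' = some k := by
        have := (PySem.List.index?_isSome_iff (r :: rs) m').mpr hmem
        exact Option.isSome_iff_exists.mp this
      by_cases hd : mx < d
      · simp only [if_pos hd]
        rw [ih d (count+1) (count+1), hm']
        by_cases hdm : d < m'
        · simp only [if_pos hdm]
          have hmm : max d m' = m' := by omega
          have hne : d ≠ m' := by omega
          rw [hmax, hmm, if_pos (by omega : mx < m'),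
              PySem.List.index?_cons_of_ne (r::rs) hne, hk]
          simp only [Option.map_some, Option.getD_some]
          push_cast; ring
        · simp only [if_neg hdm]
          have hmm : max d m' = d := by omega
          rw [hmax, hmm, if_pos hd, PySem.List.index?_cons_self d (r::rs)]
          simp
      · simp only [if_neg hd]
        rw [ih mx q (count+1), hm']
        have hdle : d ≤ mx := by omega
        by_cases hxm : mx < m'
        · simp only [if_pos hxm]
          have hmm : max d m' = m' := by omega
          have hne : d ≠ m' := by omega
          rw [hmax, hmm, if_pos hxm, PySem.List.index?_cons_of_ne (r::rs) hne, hk]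
          simp only [Option.map_some, Option.getD_some]
          push_cast; ring
        · simp only [if_neg hxm]
          rw [hmax, if_neg (by omega : ¬ mx < max d m')]

theorem f_agree (n : Int) (hn : 0 ≤ n) : f n = f_alt n := by
  have hds : (PySem.Int.toStr n).toList = Nat.toDigits 10 n.toNat := by
    rw [PySem.Int.toList_toStr, PySem.Int.toChars, if_neg (by omega)]
  set ds := (PySem.Int.toStr n).toList with hdsdef
  set vs := ds.map (fun c => (PySem.Int.ofChars? [c]).getD 0) with hvs
  have hA : f n = (vs.foldl (fun (st : Int × Int × Int) d =>
      let count := st.2.2 + 1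
      if st.1 < d then (d, count, count) else (st.1, st.2.1, count)) (-1, 0, 0)).2.1 := by
    rw [hvs, List.foldl_map]
    rfl
  have hnonneg : ∀ x ∈ vs, (0:Int) ≤ x := by
    intro x hx
    rw [hvs] at hx
    obtain ⟨c, hc, hv⟩ := List.mem_map.mp hx
    have hdig : c.isDigit = true :=
      Nat.isDigit_of_mem_toDigits (by norm_num) (by norm_num) (hds ▸ hc)
    have h48 : 48 ≤ c.toNat := by
      simp only [Char.isDigit, Bool.and_eq_true, decide_eq_true_eq] at hdig
      exact hdig.1
    rw [← hv, digit_ofChars c hdig]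
    simp
    omega
  have hne : vs ≠ [] := by
    rw [hvs, hds]
    intro hemp
    have h0 := List.map_eq_nil_iff.mp hemp
    have hp := @Nat.length_toDigits_pos 10 n.toNat
    rw [h0] at hp
    simp at hp
  obtain ⟨w, ws, hcons⟩ := List.exists_cons_of_ne_nil hne
  have hmax : PySem.List.max? vs (fun x => x) = some (ws.foldl max w) := by
    rw [hcons]; exact PySem.List.max?_id_cons w ws
  set m := ws.foldl max w with hm
  have hmem : m ∈ vs := PySem.List.max?_mem hmax
  have hm0 : (0:Int) ≤ m := hnonneg m hmem
  rw [hA, loopA_eq, hmax]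
  dsimp only
  rw [if_pos (by omega : (-1:Int) < m)]
  unfold f_alt
  simp only [← hdsdef, ← hvs, hmax]
  ring

-- ===== VERDICT (by name: the statement is the Claim_ definition above) =====
theorem f_spec : Claim_equal_f := by
  intro n _hd hpre
  unfold Spec_f
  exact f_agree n hpre
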